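-- pv_equiv track=rewrite | github.com/avinashmishra26/python-code | exam/create_pairs.py | occurrence
-- ===== SOURCE A (Python) =====
-- def createPairs () :
--        letters = 'abcdefghijklmnopqrstuvwxyz'
--        letList = list ( letters )
--        pairs = []
--        for i1 in range ( len ( letList ) ) :
--               for i2 in range ( i1 , len ( letList ) ) :
--                  pairs . append ( letList [ i1 ]+ letList [ i2 ])
--        return ( pairs )
--
-- def occurrence ( l ) :
--        counts = {}  #1
--        pairs = createPairs ()
--        for s in l :
--           for p in pairs :
--              old_value = counts.get(p,0)
--              counts [p] =  old_value + s.count(p) #2-3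
--        return ( counts )
-- ===== SOURCE B (Python) =====
-- def occurrence(l):
--     if not l:
--         return {}
--     letters = 'abcdefghijklmnopqrstuvwxyz'
--     counts = {}
--     for i in range(len(letters)):
--         for j in range(i, len(letters)):
--             counts[letters[i] + letters[j]] = 0
--     for s in l:
--         k = 0
--         n = len(s)
--         while k < n:
--             c = s[k]
--             j = k + 1
--             while j < n and s[j] == c:
--                 j += 1
--             if 'a' <= c <= 'z':
--                 counts[c + c] += (j - k) // 2
--                 if j < n and c < s[j] <= 'z':
--                     counts[c + s[j]] += 1
--             k = j
--     return counts
-- ===== Notes on version B (the rewrite author's own statement) =====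
-- stated objective: faster
-- what changed: B makes one linear run/boundary scan over each string (adding run_length//2 to the equal-letter pair and 1 per ascending adjacent letter pair) into a table pre-initialized with all 351 keys, instead of calling s.count(p) for each of the 351 pairs on every string.
import Mathlib
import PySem

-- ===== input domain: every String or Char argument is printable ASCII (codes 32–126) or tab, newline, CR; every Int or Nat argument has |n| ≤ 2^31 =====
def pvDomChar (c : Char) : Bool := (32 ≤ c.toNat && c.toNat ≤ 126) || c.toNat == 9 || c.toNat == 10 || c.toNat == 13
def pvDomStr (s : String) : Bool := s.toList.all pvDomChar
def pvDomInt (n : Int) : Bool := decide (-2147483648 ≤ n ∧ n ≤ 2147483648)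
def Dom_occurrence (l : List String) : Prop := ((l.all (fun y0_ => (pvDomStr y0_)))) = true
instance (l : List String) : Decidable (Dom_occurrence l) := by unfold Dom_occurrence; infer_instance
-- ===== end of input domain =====

-- B replaces A's 351 substring-count scans per string with one linear run/boundary scan per
-- string (objective: faster, measured; same return value; no argument is mutated).

-- ===== PORT A =====
def createPairs : List String :=
  let letters := "abcdefghijklmnopqrstuvwxyz"
  let letList := letters.toList
  let pairs : List String :=
    (PySem.List.pyRange 0 (letList.length : Int) 1).foldl (fun pairs i1 =>
      (PySem.List.pyRange i1 (letList.length : Int) 1).foldl (fun pairs i2 =>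
        pairs ++ [String.ofList [PySem.List.pyGetD letList i1 ' ', PySem.List.pyGetD letList i2 ' ']]) pairs) []
  pairs

def occurrence (l : List String) : List (String × Int) :=
  let counts : PySem.Dict String Int := PySem.Dict.mk []
  let pairs := createPairs
  (l.foldl (fun counts s =>
    pairs.foldl (fun counts p =>
      let old_value := counts.getD p 0
      counts.insert p (old_value + (PySem.Str.count s p : Int))) counts) counts).items

-- ===== PORT B =====
-- B's inner while loop: length of the maximal run of c minus one, and the remainder of the string
def scanRun (c : Char) : List Char → Nat × List Char
  | [] => (0, [])
  | d :: t => if d = c then ((scanRun c t).1 + 1, (scanRun c t).2) else (0, d :: t)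

-- needed by scanStr's termination proof
theorem scanRun_len (c : Char) : ∀ t : List Char, (scanRun c t).2.length ≤ t.length := by
  intro t
  induction t with
  | nil => simp [scanRun]
  | cons d t ih =>
    by_cases h : d = c <;> simp [scanRun, h]
    omega

-- B's outer while loop over one string (positions k, j become list positions)
def scanStr : PySem.Dict String Int → List Char → PySem.Dict String Int
  | counts, [] => counts
  | counts, c :: t =>
    let r := scanRun c t
    let counts1 :=
      if 'a' ≤ c ∧ c ≤ 'z' then
        let counts' := counts.modify (String.ofList [c, c]) 0 (· + (((r.1 + 1) / 2 : Nat) : Int))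
        match r.2 with
        | d :: _ => if c < d ∧ d ≤ 'z' then counts'.modify (String.ofList [c, d]) 0 (· + 1) else counts'
        | [] => counts'
      else counts
    scanStr counts1 r.2
termination_by _ cs => cs.length
decreasing_by
  have := scanRun_len c t
  simp only [List.length_cons]
  omega

def occurrence_alt (l : List String) : List (String × Int) :=
  match l with
  | [] => []
  | _ :: _ =>
    let letters := "abcdefghijklmnopqrstuvwxyz".toList
    let counts0 : PySem.Dict String Int :=
      (PySem.List.pyRange 0 (letters.length : Int) 1).foldl (fun counts i =>
        (PySem.List.pyRange i (letters.length : Int) 1).foldl (fun counts j =>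
          counts.insert (String.ofList [PySem.List.pyGetD letters i ' ', PySem.List.pyGetD letters j ' ']) 0) counts)
        (PySem.Dict.mk [])
    (l.foldl (fun counts s => scanStr counts s.toList) counts0).items

-- ===== PRECONDITION & SPEC =====
def Spec_occurrence (l : List String) (out : List (String × Int)) : Prop := out = occurrence_alt l
instance (l : List String) (out : List (String × Int)) : Decidable (Spec_occurrence l out) := by unfold Spec_occurrence; infer_instance

-- ===== CLAIM (what is proved, stated in full; the proofs are below) =====
def Claim_equal_occurrence : Prop := ∀ (l : List String), Dom_occurrence l → Spec_occurrence l (occurrence l)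

-- ===== LEMMAS AND PROOFS =====

-- the 26 letters and the 351 ordered pairs, as data the proofs index the dict by
def pvLetters : List Char := (List.range 26).map (fun i => Char.ofNat (97 + i))

def pvKeys : List (Char × Char) :=
  pvLetters.flatMap (fun a => (pvLetters.filter (fun b => a ≤ b)).map (fun b => (a, b)))

def pvMk (q : Char × Char) : String := String.ofList [q.1, q.2]

-- both programs' dicts always have the 351 pair keys in this fixed order; only values vary
def pvShape (f : Char × Char → Int) : List (String × Int) := pvKeys.map (fun q => (pvMk q, f q))

theorem pvMk_inj {q q' : Char × Char} (h : pvMk q = pvMk q') : q = q' := by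
  have h2 : ([q.1, q.2] : List Char) = [q'.1, q'.2] := by
    simpa [pvMk] using congrArg String.toList h
  obtain ⟨x, y⟩ := q
  obtain ⟨x', y'⟩ := q'
  simp_all

set_option maxRecDepth 200000 in
theorem createPairs_eq : createPairs = pvKeys.map pvMk := by decide

set_option maxRecDepth 200000 in
theorem pvKeys_nodup : pvKeys.Nodup := by decide

set_option maxRecDepth 200000 in
theorem pvKeys_bounds : ∀ q ∈ pvKeys, 'a' ≤ q.1 ∧ q.1 ≤ q.2 ∧ q.2 ≤ 'z' := by decide

theorem mem_pvLetters {c : Char} (h1 : 'a' ≤ c) (h2 : c ≤ 'z') : c ∈ pvLetters := by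
  have hv1 : 97 ≤ c.toNat := h1
  have hv2 : c.toNat ≤ 122 := h2
  have : c = Char.ofNat (97 + (c.toNat - 97)) := by
    have h : 97 + (c.toNat - 97) = c.toNat := by omega
    rw [h, Char.ofNat_toNat]
  exact List.mem_map.mpr ⟨c.toNat - 97, List.mem_range.mpr (by omega), this.symm⟩

theorem mem_pvKeys {a b : Char} (ha : 'a' ≤ a) (hab : a ≤ b) (hb : b ≤ 'z') : (a, b) ∈ pvKeys := by
  refine List.mem_flatMap.mpr ⟨a, mem_pvLetters ha (le_trans hab hb), ?_⟩
  exact List.mem_map.mpr ⟨b, List.mem_filter.mpr ⟨mem_pvLetters (le_trans ha hab) hb, by simpa using hab⟩, rfl⟩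

-- dict-shape lemmas: lookups, inserts and modifies on a dict whose items are pvShape f
theorem find?_shape (f : Char × Char → Int) {q0 : Char × Char} :
    ∀ (K : List (Char × Char)), q0 ∈ K →
      List.find? (fun p => p.1 == pvMk q0) (K.map (fun q => (pvMk q, f q))) = some (pvMk q0, f q0) := by
  intro K hK
  induction K with
  | nil => simp at hK
  | cons q K ih =>
    by_cases h : q = q0
    · subst h; simp
    · have hne : (pvMk q == pvMk q0) = false := by
        simp only [beq_eq_false_iff_ne, ne_eq]
        intro hc; exact h (pvMk_inj hc)
      have hmem : q0 ∈ K := by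
        rcases List.mem_cons.mp hK with h' | h'
        · exact absurd h'.symm h
        · exact h'
      simp [hne, ih hmem]

theorem getD_shape {d : PySem.Dict String Int} {f : Char × Char → Int}
    (hd : d.items = pvShape f) {q0 : Char × Char} (hq : q0 ∈ pvKeys) (dflt : Int) :
    d.getD (pvMk q0) dflt = f q0 := by
  simp [PySem.Dict.getD, PySem.Dict.get?, hd, pvShape, find?_shape f pvKeys hq]

theorem contains_shape {d : PySem.Dict String Int} {f : Char × Char → Int}
    (hd : d.items = pvShape f) {q0 : Char × Char} (hq : q0 ∈ pvKeys) :
    d.contains (pvMk q0) = true := by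
  have h := find?_shape f pvKeys hq
  simp only [PySem.Dict.contains, hd, pvShape]
  exact List.any_eq_true.mpr ⟨(pvMk q0, f q0), List.mem_of_find?_eq_some h, by simp⟩

theorem insert_shape {d : PySem.Dict String Int} {f : Char × Char → Int}
    (hd : d.items = pvShape f) {q0 : Char × Char} (hq : q0 ∈ pvKeys) (v : Int) :
    (d.insert (pvMk q0) v).items = pvShape (fun q => if q = q0 then v else f q) := by
  simp only [PySem.Dict.insert, contains_shape hd hq, if_true, hd, pvShape, List.map_map]
  refine List.map_congr_left ?_
  intro q _
  by_cases h : q = q0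
  · subst h; simp
  · have hne : (pvMk q == pvMk q0) = false := by
      simp only [beq_eq_false_iff_ne, ne_eq]
      intro hc; exact h (pvMk_inj hc)
    simp only [Function.comp_apply, hne, Bool.false_eq_true, if_false, if_neg h]

theorem modify_shape {d : PySem.Dict String Int} {f : Char × Char → Int}
    (hd : d.items = pvShape f) {q0 : Char × Char} (hq : q0 ∈ pvKeys) (g : Int → Int) :
    (d.modify (pvMk q0) 0 g).items = pvShape (fun q => if q = q0 then g (f q0) else f q) := by
  simp only [PySem.Dict.modify, getD_shape hd hq]
  exact insert_shape hd hq _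

-- the non-overlapping two-character count that str.count computes for pattern [a, b]
def cnt2 (a b : Char) : List Char → Nat
  | x :: y :: t => if x = a ∧ y = b then cnt2 a b t + 1 else cnt2 a b (y :: t)
  | _ => 0

@[simp] theorem cnt2_nil (a b : Char) : cnt2 a b [] = 0 := rfl
@[simp] theorem cnt2_single (a b x : Char) : cnt2 a b [x] = 0 := rfl

theorem cnt2_cons_cons (a b x y : Char) (t : List Char) :
    cnt2 a b (x :: y :: t) = if x = a ∧ y = b then cnt2 a b t + 1 else cnt2 a b (y :: t) := by
  rw [cnt2]

theorem cnt2_cons_ne {a x : Char} (b : Char) (h : x ≠ a) (l : List Char) :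
    cnt2 a b (x :: l) = cnt2 a b l := by
  cases l with
  | nil => rfl
  | cons y t => rw [cnt2_cons_cons, if_neg (by rintro ⟨h1, -⟩; exact h h1)]

theorem go_nil (sub : List Char) (fuel acc : Nat) :
    PySem.Chars.count.go sub fuel [] acc = acc := by
  cases fuel <;> rfl

theorem go_pair_eq (a b : Char) :
    ∀ (fuel : Nat) (l : List Char) (acc : Nat), l.length ≤ fuel →
      PySem.Chars.count.go [a, b] fuel l acc = acc + cnt2 a b l := by
  intro fuel
  induction fuel with
  | zero =>
    intro l acc h
    have : l = [] := List.length_eq_zero_iff.mp (Nat.le_zero.mp h)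
    subst this
    simp [go_nil]
  | succ n ih =>
    intro l acc h
    match l with
    | [] => simp [go_nil]
    | [x] =>
      rw [PySem.Chars.count.go]
      have hp : [a, b].isPrefixOf [x] = false := by
        cases hax : a == x <;> simp [List.isPrefixOf, hax]
      rw [hp]
      simp [go_nil]
    | x :: y :: t =>
      rw [PySem.Chars.count.go]
      by_cases hp : x = a ∧ y = b
      · obtain ⟨hx, hy⟩ := hp
        subst hx; subst hy
        have hpre : [x, y].isPrefixOf (x :: y :: t) = true := by
          simp [List.isPrefixOf]
        rw [hpre]
        simp only [if_true, List.length_cons, List.length_nil]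
        have ht : t.length ≤ n := by simp at h; omega
        simp only [List.drop_succ_cons, List.drop_zero, Nat.zero_add]
        rw [ih t (acc + 1) ht, cnt2_cons_cons, if_pos ⟨rfl, rfl⟩]
        omega
      · have hpre : [a, b].isPrefixOf (x :: y :: t) = false := by
          cases hax : a == x with
          | false => simp [List.isPrefixOf, hax]
          | true =>
            cases hby : b == y with
            | false => simp [List.isPrefixOf, hax, hby]
            | true =>
              exact absurd ⟨(beq_iff_eq.mp hax).symm, (beq_iff_eq.mp hby).symm⟩ hp
        rw [hpre]
        simp only [Bool.false_eq_true, if_false]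
        rw [ih (y :: t) acc (by simp at h ⊢; omega), cnt2_cons_cons, if_neg hp]

theorem count_pair (a b : Char) (cs : List Char) :
    PySem.Chars.count cs [a, b] = cnt2 a b cs := by
  rw [PySem.Chars.count]
  simp only [List.isEmpty_cons, Bool.false_eq_true, if_false]
  rw [go_pair_eq a b cs.length cs 0 (le_refl _)]
  omega

-- run decomposition facts about scanRun
theorem scanRun_decomp (c : Char) : ∀ t : List Char, t = List.replicate (scanRun c t).1 c ++ (scanRun c t).2 := by
  intro t
  induction t with
  | nil => rfl
  | cons d t ih =>
    by_cases h : d = c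
    · subst h
      simp only [scanRun, if_true, List.replicate_succ, List.cons_append]
      exact congrArg _ ih
    · simp [scanRun, h]

theorem scanRun_head (c : Char) : ∀ t : List Char, (scanRun c t).2.head? ≠ some c := by
  intro t
  induction t with
  | nil => simp [scanRun]
  | cons d t ih =>
    by_cases h : d = c
    · simpa [scanRun, h] using ih
    · simp [scanRun, h]

-- counting a pattern across one maximal run and the remainder
theorem cnt2_replicate_ne {a c : Char} (b : Char) (h : c ≠ a) (rest : List Char) :
    ∀ n, cnt2 a b (List.replicate n c ++ rest) = cnt2 a b rest := by
  intro n
  induction n with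
  | zero => simp
  | succ m ih => simpa [List.replicate_succ, cnt2_cons_ne b h] using ih

theorem cnt2_run_cc (c : Char) (rest : List Char) (hb : rest.head? ≠ some c) :
    ∀ n, cnt2 c c (List.replicate n c ++ rest) = n / 2 + cnt2 c c rest := by
  intro n
  induction n using Nat.strong_induction_on with
  | _ n ih =>
    match n with
    | 0 => simp
    | 1 =>
      cases rest with
      | nil => simp
      | cons d t =>
        have hd : d ≠ c := by simpa using hb
        simp only [List.replicate_succ, List.replicate_zero, List.nil_append, List.cons_append]
        rw [cnt2_cons_cons, if_neg (by rintro ⟨-, h2⟩; exact hd h2)]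
        omega
    | (m + 2) =>
      have hsh : List.replicate (m + 2) c ++ rest = c :: c :: (List.replicate m c ++ rest) := by
        simp [List.replicate_succ]
      rw [hsh, cnt2_cons_cons, if_pos ⟨rfl, rfl⟩, ih m (by omega)]
      omega

theorem cnt2_run_cb {b c : Char} (hbc : b ≠ c) (rest : List Char) :
    ∀ n, 1 ≤ n →
      cnt2 c b (List.replicate n c ++ rest) =
        (if rest.head? = some b then 1 else 0) + cnt2 c b rest := by
  intro n
  induction n with
  | zero => omega
  | succ m ih =>
    intro _
    match m with
    | 0 =>
      cases rest with
      | nil => simp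
      | cons d t =>
        simp only [List.replicate_succ, List.replicate_zero, List.nil_append, List.cons_append]
        by_cases hdb : d = b
        · subst hdb
          rw [cnt2_cons_cons, if_pos ⟨rfl, rfl⟩]
          rw [cnt2_cons_ne d hbc]
          simp [Nat.add_comm]
        · rw [cnt2_cons_cons, if_neg (by rintro ⟨-, h2⟩; exact hdb h2)]
          simp [hdb]
    | (k + 1) =>
      have h1 : List.replicate (k + 2) c ++ rest = c :: c :: (List.replicate k c ++ rest) := by
        simp [List.replicate_succ]
      have h2 : List.replicate (k + 1) c ++ rest = c :: (List.replicate k c ++ rest) := by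
        simp [List.replicate_succ]
      rw [h1, cnt2_cons_cons, if_neg (by rintro ⟨-, hc2⟩; exact hbc hc2.symm), ← h2]
      exact ih (by omega)

theorem cnt2_run (a b c : Char) (rest : List Char) (hb : rest.head? ≠ some c) (n : Nat) (hn : 1 ≤ n) :
    cnt2 a b (List.replicate n c ++ rest) =
      (if a = c ∧ b = c then n / 2 else 0) +
      ((if a = c ∧ b ≠ c ∧ rest.head? = some b then 1 else 0) + cnt2 a b rest) := by
  by_cases hac : a = c
  · subst hac
    by_cases hbc : b = a
    · subst hbc
      rw [cnt2_run_cc b rest hb n]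
      simp
    · rw [cnt2_run_cb hbc rest n hn]
      simp [hbc]
  · rw [cnt2_replicate_ne b (fun h => hac h.symm) rest n]
    rw [if_neg (by rintro ⟨h1, -⟩; exact hac h1), if_neg (by rintro ⟨h1, -, -⟩; exact hac h1)]
    omega

-- the cons-step equation of scanStr, spelled out
theorem scanStr_cons (counts : PySem.Dict String Int) (c : Char) (t : List Char) :
    scanStr counts (c :: t) =
      scanStr
        (if 'a' ≤ c ∧ c ≤ 'z' then
          let counts' := counts.modify (String.ofList [c, c]) 0 (· + ((((scanRun c t).1 + 1) / 2 : Nat) : Int))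
          match (scanRun c t).2 with
          | d :: _ => if c < d ∧ d ≤ 'z' then counts'.modify (String.ofList [c, d]) 0 (· + 1) else counts'
          | [] => counts'
        else counts) (scanRun c t).2 := by
  rw [scanStr]

-- effect of B's scan of one string on the whole table
theorem scanStr_shape :
    ∀ (n : Nat) (cs : List Char), cs.length ≤ n →
      ∀ (f : Char × Char → Int) (d : PySem.Dict String Int),
        d.items = pvShape f →
        (scanStr d cs).items = pvShape (fun q => f q + (cnt2 q.1 q.2 cs : Int)) := by
  intro n
  induction n with
  | zero =>
    intro cs h f d hd
    have : cs = [] := List.length_eq_zero_iff.mp (Nat.le_zero.mp h)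
    subst this
    rw [scanStr, hd]
    exact List.map_congr_left (fun q _ => by simp)
  | succ n ih =>
    intro cs h f d hd
    match cs with
    | [] =>
      rw [scanStr, hd]
      exact List.map_congr_left (fun q _ => by simp)
    | c :: t =>
      have hdec : c :: t = List.replicate ((scanRun c t).1 + 1) c ++ (scanRun c t).2 := by
        rw [List.replicate_succ, List.cons_append]
        exact congrArg (c :: ·) (scanRun_decomp c t)
      have hh := scanRun_head c t
      have hlen : (scanRun c t).2.length ≤ n := by
        have h1 := scanRun_len c t
        simp at h
        omega
      have hcnt : ∀ q : Char × Char,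
          (cnt2 q.1 q.2 (c :: t) : Int) =
            (if q.1 = c ∧ q.2 = c then ((((scanRun c t).1 + 1) / 2 : Nat) : Int) else 0) +
            ((if q.1 = c ∧ q.2 ≠ c ∧ (scanRun c t).2.head? = some q.2 then 1 else 0) +
              (cnt2 q.1 q.2 (scanRun c t).2 : Int)) := by
        intro q
        rw [hdec, cnt2_run q.1 q.2 c (scanRun c t).2 hh ((scanRun c t).1 + 1) (by omega)]
        split_ifs <;> push_cast <;> ring
      rw [scanStr_cons]
      by_cases hlc : 'a' ≤ c ∧ c ≤ 'z'
      · rw [if_pos hlc]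
        have hmcc : (c, c) ∈ pvKeys := mem_pvKeys hlc.1 le_rfl hlc.2
        have ecc : String.ofList [c, c] = pvMk (c, c) := rfl
        have h1 := modify_shape hd hmcc (· + ((((scanRun c t).1 + 1) / 2 : Nat) : Int))
        cases hrest : (scanRun c t).2 with
        | nil =>
          rw [hrest] at hcnt
          show (scanStr (d.modify (String.ofList [c, c]) 0
              (· + ((((scanRun c t).1 + 1) / 2 : Nat) : Int))) []).items
            = pvShape fun q => f q + ((cnt2 q.1 q.2 (c :: t) : Nat) : Int)
          rw [scanStr, ecc, h1]
          refine List.map_congr_left ?_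
          intro q hq
          have hb := pvKeys_bounds q hq
          refine congrArg (Prod.mk (pvMk q)) ?_
          dsimp only
          rw [hcnt q]
          by_cases hqc : q = (c, c)
          · subst hqc
            simp
          · rw [if_neg hqc, if_neg (by rintro ⟨ha1, ha2⟩; exact hqc (Prod.ext ha1 ha2))]
            simp
        | cons dch t' =>
          have hdc : dch ≠ c := by
            rw [hrest] at hh
            simpa using hh
          rw [hrest] at hcnt
          show (scanStr (if c < dch ∧ dch ≤ 'z' then
                (d.modify (String.ofList [c, c]) 0
                  (· + ((((scanRun c t).1 + 1) / 2 : Nat) : Int))).modify (String.ofList [c, dch]) 0 (· + 1)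
              else d.modify (String.ofList [c, c]) 0
                  (· + ((((scanRun c t).1 + 1) / 2 : Nat) : Int))) (dch :: t')).items
            = pvShape fun q => f q + ((cnt2 q.1 q.2 (c :: t) : Nat) : Int)
          by_cases hbc : c < dch ∧ dch ≤ 'z'
          · rw [if_pos hbc]
            have hmcd : (c, dch) ∈ pvKeys := mem_pvKeys hlc.1 (le_of_lt hbc.1) hbc.2
            have ecd : String.ofList [c, dch] = pvMk (c, dch) := rfl
            have h2 := modify_shape h1 hmcd (· + 1)
            rw [ecc, ecd] at *
            rw [ih (dch :: t') (hrest ▸ hlen) _ _ h2]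
            refine List.map_congr_left ?_
            intro q hq
            have hb := pvKeys_bounds q hq
            refine congrArg (Prod.mk (pvMk q)) ?_
            dsimp only
            rw [hcnt q]
            by_cases hq1 : q = (c, c)
            · subst hq1
              rw [if_neg (by intro hx; exact hdc (congrArg Prod.snd hx).symm), if_pos rfl]
              rw [if_pos ⟨rfl, rfl⟩, if_neg (by rintro ⟨-, h2', -⟩; exact h2' rfl)]
              ring
            · by_cases hq2 : q = (c, dch)
              · subst hq2
                rw [if_pos rfl, if_neg hq1]
                rw [if_neg (by rintro ⟨-, ha2⟩; exact hdc ha2), if_pos ⟨rfl, hdc, rfl⟩]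
                ring
              · rw [if_neg hq2, if_neg hq1]
                rw [if_neg (by rintro ⟨ha1, ha2⟩; exact hq1 (Prod.ext ha1 ha2))]
                rw [if_neg (by
                  rintro ⟨ha1, -, ha3⟩
                  have : q.2 = dch := by simpa using ha3.symm
                  exact hq2 (Prod.ext ha1 this))]
                ring
          · rw [if_neg hbc]
            rw [ecc] at *
            rw [ih (dch :: t') (hrest ▸ hlen) _ _ h1]
            refine List.map_congr_left ?_
            intro q hq
            have hb := pvKeys_bounds q hq
            refine congrArg (Prod.mk (pvMk q)) ?_
            dsimp only
            rw [hcnt q]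
            by_cases hq1 : q = (c, c)
            · subst hq1
              rw [if_pos rfl, if_pos ⟨rfl, rfl⟩, if_neg (by rintro ⟨-, h2', -⟩; exact h2' rfl)]
              ring
            · rw [if_neg hq1, if_neg (by rintro ⟨ha1, ha2⟩; exact hq1 (Prod.ext ha1 ha2))]
              rw [if_neg (by
                rintro ⟨ha1, ha2, ha3⟩
                have hq2d : q.2 = dch := by simpa using ha3.symm
                have hcle : c ≤ dch := by rw [← ha1, ← hq2d]; exact hb.2.1
                exact hbc ⟨lt_of_le_of_ne hcle (fun hx => ha2 (by rw [hq2d, ← hx])),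
                  by rw [← hq2d]; exact hb.2.2⟩)]
              ring
      · rw [if_neg hlc]
        rw [ih (scanRun c t).2 hlen _ _ hd]
        refine List.map_congr_left ?_
        intro q hq
        have hb := pvKeys_bounds q hq
        refine congrArg (Prod.mk (pvMk q)) ?_
        dsimp only
        rw [hcnt q]
        have hqc : ¬ q.1 = c := by
          intro hx
          exact hlc ⟨hx ▸ hb.1, hx ▸ le_trans hb.2.1 hb.2.2⟩
        rw [if_neg (by rintro ⟨h1, -⟩; exact hqc h1), if_neg (by rintro ⟨h1, -, -⟩; exact hqc h1)]
        ring

-- A's inner loop over the pair list: a fold of in-place updates over the full key list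
theorem foldl_update (g : Char × Char → Int → Int) :
    ∀ (J : List (Char × Char)), (∀ q ∈ J, q ∈ pvKeys) → J.Nodup →
      ∀ (f : Char × Char → Int) (d : PySem.Dict String Int), d.items = pvShape f →
        (J.foldl (fun d q => d.insert (pvMk q) (g q (d.getD (pvMk q) 0))) d).items
          = pvShape (fun q => if q ∈ J then g q (f q) else f q) := by
  intro J
  induction J with
  | nil => intro _ _ f d hd; simpa [pvShape] using hd
  | cons q0 J ih =>
    intro hJK hnd f d hd
    have hq0 : q0 ∈ pvKeys := hJK q0 (by simp)
    have hd1 : (d.insert (pvMk q0) (g q0 (d.getD (pvMk q0) 0))).items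
        = pvShape (fun q => if q = q0 then g q0 (f q0) else f q) := by
      rw [getD_shape hd hq0]
      exact insert_shape hd hq0 _
    simp only [List.foldl_cons]
    rw [ih (fun q hq => hJK q (by simp [hq])) (List.nodup_cons.mp hnd).2 _ _ hd1]
    refine List.map_congr_left ?_
    intro q _
    have hq0J : q0 ∉ J := (List.nodup_cons.mp hnd).1
    by_cases h1 : q = q0
    · subst h1
      simp [hq0J]
    · by_cases h2 : q ∈ J <;> simp [h1, h2]

-- A's inner loop for the first string: the same fold starting from the empty dict appends fresh keys
theorem foldl_fresh (F : Char × Char → Int) :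
    ∀ (J : List (Char × Char)), J.Nodup →
      ∀ (d : PySem.Dict String Int), (∀ q ∈ J, d.contains (pvMk q) = false) →
        (J.foldl (fun d q => d.insert (pvMk q) (d.getD (pvMk q) 0 + F q)) d).items
          = d.items ++ J.map (fun q => (pvMk q, F q)) := by
  intro J
  induction J with
  | nil => intro _ d _; simp
  | cons q0 J ih =>
    intro hnd d hfresh
    have hq0 : d.contains (pvMk q0) = false := hfresh q0 (by simp)
    have hq0' : (d.items.any fun p => p.1 == pvMk q0) = false := hq0
    have hnone : List.find? (fun p => p.1 == pvMk q0) d.items = none := by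
      rw [List.find?_eq_none]
      intro p hp
      simpa using List.any_eq_false.mp hq0' p hp
    have hget : d.getD (pvMk q0) 0 = 0 := by
      simp [PySem.Dict.getD, PySem.Dict.get?, hnone]
    have hins : (d.insert (pvMk q0) (d.getD (pvMk q0) 0 + F q0)).items
        = d.items ++ [(pvMk q0, F q0)] := by
      rw [hget]
      simp [PySem.Dict.insert, hq0]
    simp only [List.foldl_cons]
    rw [ih (List.nodup_cons.mp hnd).2]
    · rw [hins]
      simp
    · intro q hq
      have hqne : q ≠ q0 := fun h => (List.nodup_cons.mp hnd).1 (h ▸ hq)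
      have hof := hfresh q (by simp [hq])
      simp only [PySem.Dict.contains, List.any_eq_false] at hof ⊢
      intro p hp
      rw [hins] at hp
      rcases List.mem_append.mp hp with hp' | hp'
      · exact hof p hp'
      · simp only [List.mem_singleton] at hp'
        subst hp'
        intro hc
        exact hqne (pvMk_inj (beq_iff_eq.mp hc)).symm

-- folding a shape-preserving per-string step over a list of strings
theorem fold_strings (step : PySem.Dict String Int → String → PySem.Dict String Int)
    (δ : Char × Char → String → Int)
    (hstep : ∀ (f : Char × Char → Int) (d : PySem.Dict String Int) (s : String),
      d.items = pvShape f → (step d s).items = pvShape (fun q => f q + δ q s)) :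
    ∀ (ss : List String) (f : Char × Char → Int) (d : PySem.Dict String Int),
      d.items = pvShape f →
      (ss.foldl step d).items = pvShape (fun q => f q + (ss.map (δ q)).sum) := by
  intro ss
  induction ss with
  | nil => intro f d hd; simpa [pvShape] using hd
  | cons s ss ih =>
    intro f d hd
    simp only [List.foldl_cons]
    rw [ih _ _ (hstep f d s hd)]
    refine List.map_congr_left ?_
    intro q _
    simp [add_assoc]

-- the per-string addend is the same for both programs
theorem delta_eq (q : Char × Char) (s : String) :
    (PySem.Str.count s (pvMk q) : Int) = (cnt2 q.1 q.2 s.toList : Int) := by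
  have : (pvMk q).toList = [q.1, q.2] := by simp [pvMk]
  rw [PySem.Str.count, this, count_pair]

set_option maxRecDepth 200000 in
set_option maxHeartbeats 2000000 in
theorem init_shape :
    ((PySem.List.pyRange 0 (("abcdefghijklmnopqrstuvwxyz".toList).length : Int) 1).foldl (fun counts i =>
        (PySem.List.pyRange i (("abcdefghijklmnopqrstuvwxyz".toList).length : Int) 1).foldl (fun counts j =>
          counts.insert (String.ofList [PySem.List.pyGetD ("abcdefghijklmnopqrstuvwxyz".toList) i ' ',
            PySem.List.pyGetD ("abcdefghijklmnopqrstuvwxyz".toList) j ' ']) 0) counts)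
        (PySem.Dict.mk [] : PySem.Dict String Int)).items = pvShape (fun _ => 0) := by decide

-- ===== VERDICT (by name: the statement is the Claim_ definition above) =====
theorem occurrence_spec : Claim_equal_occurrence := by
  unfold Claim_equal_occurrence Spec_occurrence
  intro l _
  have hstepA : ∀ (f : Char × Char → Int) (d : PySem.Dict String Int) (s : String),
      d.items = pvShape f →
      (createPairs.foldl (fun counts p =>
        let old_value := counts.getD p 0
        counts.insert p (old_value + (PySem.Str.count s p : Int))) d).items
        = pvShape (fun q => f q + (PySem.Str.count s (pvMk q) : Int)) := by
    intro f d s hd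
    rw [createPairs_eq, List.foldl_map]
    rw [foldl_update (fun q v => v + (PySem.Str.count s (pvMk q) : Int)) pvKeys (fun q hq => hq)
      pvKeys_nodup f d hd]
    exact List.map_congr_left (fun q hq => by simp [hq])
  have hstepB : ∀ (f : Char × Char → Int) (d : PySem.Dict String Int) (s : String),
      d.items = pvShape f →
      (scanStr d s.toList).items = pvShape (fun q => f q + (cnt2 q.1 q.2 s.toList : Int)) :=
    fun f d s hd => scanStr_shape s.toList.length s.toList le_rfl f d hd
  cases l with
  | nil => rfl
  | cons s rest =>
    show (((s :: rest).foldl (fun counts s =>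
        createPairs.foldl (fun counts p =>
          let old_value := counts.getD p 0
          counts.insert p (old_value + (PySem.Str.count s p : Int))) counts) (PySem.Dict.mk [])).items)
      = occurrence_alt (s :: rest)
    have hfirst : ((createPairs.foldl (fun counts p =>
        let old_value := counts.getD p 0
        counts.insert p (old_value + (PySem.Str.count s p : Int))) (PySem.Dict.mk [] : PySem.Dict String Int))).items
        = pvShape (fun q => (PySem.Str.count s (pvMk q) : Int)) := by
      rw [createPairs_eq, List.foldl_map]
      rw [foldl_fresh (fun q => (PySem.Str.count s (pvMk q) : Int)) pvKeys pvKeys_nodup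
        (PySem.Dict.mk []) (fun q _ => rfl)]
      rfl
    rw [List.foldl_cons]
    rw [fold_strings _ (fun q s' => (PySem.Str.count s' (pvMk q) : Int)) hstepA rest
      (fun q => (PySem.Str.count s (pvMk q) : Int)) _ hfirst]
    have hB : occurrence_alt (s :: rest)
        = pvShape (fun q => 0 + (((s :: rest).map (fun s' => (cnt2 q.1 q.2 s'.toList : Int))).sum)) :=
      fold_strings (fun counts s' => scanStr counts s'.toList)
        (fun q s' => (cnt2 q.1 q.2 s'.toList : Int)) hstepB (s :: rest) (fun _ => 0) _ init_shape
    rw [hB]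
    refine List.map_congr_left ?_
    intro q _
    refine congrArg (Prod.mk (pvMk q)) ?_
    dsimp only
    rw [List.map_cons, List.sum_cons]
    rw [show rest.map (fun s' => (PySem.Str.count s' (pvMk q) : Int))
        = rest.map (fun s' => (cnt2 q.1 q.2 s'.toList : Int)) from
      List.map_congr_left (fun s' _ => delta_eq q s')]
    rw [delta_eq q s]
    ring
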